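-- pv_equiv track=rewrite | github.com/Biplob68/Competitive-programming | TwoPointer/valid_word_abbreviation_leetcode_408.py | isValidAbbreviation
-- ===== SOURCE A (Python) =====
-- def isValidAbbreviation(word, abbr):
--     abbr_index = 0
--     word_index = 0
--
--     while abbr_index < len(abbr):
--         if abbr[abbr_index].isnumeric():
--             if abbr[abbr_index] == '0':
--                 return False
--
--             num = 0
--             while abbr_index < len(abbr) and abbr[abbr_index].isnumeric():
--                 num = 10 * num + int(abbr[abbr_index])
--                 abbr_index += 1
--
--             word_index += num
--
--         else:
--             if word_index >= len(word) or word[word_index] != abbr[abbr_index]: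
--                 return False
--
--             word_index += 1
--             abbr_index += 1
--
--     return word_index == len(word) and abbr_index == len(abbr)
-- ===== SOURCE B (Python) =====
-- def isValidAbbreviation(word, abbr):
--     # Phase 1: tokenize abbr into maximal runs of numeric / non-numeric characters.
--     tokens = []
--     i = 0
--     n = len(abbr)
--     while i < n:
--         k = abbr[i].isnumeric()
--         j = i
--         while j < n and abbr[j].isnumeric() == k:
--             j += 1
--         tokens.append(abbr[i:j])
--         i = j
--     # Phase 2: consume word according to the tokens.
--     wi = 0
--     for t in tokens:
--         if t[0].isnumeric():
--             if t[0] == '0':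
--                 return False
--             num = 0
--             for c in t:
--                 num = 10 * num + int(c)
--             wi += num
--         else:
--             for c in t:
--                 if wi >= len(word) or word[wi] != c:
--                     return False
--                 wi += 1
--     return wi == len(word)
-- ===== Notes on version B (the rewrite author's own statement) =====
-- stated objective: alternative
-- what changed: Replaces A's single interleaved index-walking scan with a two-phase structure: first tokenize abbr into maximal numeric/non-numeric runs, then consume the word token by token.
import Mathlib
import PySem

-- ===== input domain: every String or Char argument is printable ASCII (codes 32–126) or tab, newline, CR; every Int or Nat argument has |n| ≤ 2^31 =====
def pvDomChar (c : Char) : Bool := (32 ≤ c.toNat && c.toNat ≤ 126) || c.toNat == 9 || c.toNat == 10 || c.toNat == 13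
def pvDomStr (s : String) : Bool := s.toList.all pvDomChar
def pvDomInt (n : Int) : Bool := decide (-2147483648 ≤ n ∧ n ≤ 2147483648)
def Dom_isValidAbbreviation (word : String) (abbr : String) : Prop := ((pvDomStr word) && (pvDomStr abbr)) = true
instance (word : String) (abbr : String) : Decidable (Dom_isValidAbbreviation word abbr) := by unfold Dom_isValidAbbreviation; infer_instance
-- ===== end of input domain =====

-- B replaces A's single interleaved scan by tokenize-then-consume; objective: alternative decomposition, same cost.
-- On the ASCII domain Dom_, Python's str.isnumeric coincides with PySem.Chars.isdigit (used in both ports).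

-- ===== PORT A =====
-- inner while loop: num accumulation; returns (num, remaining abbr suffix) —
-- the abbr index is represented by the remaining suffix of abbr.
def pvA_num (cs : List Char) (num : Nat) : Nat × List Char :=
  match cs with
  | [] => (num, [])
  | c :: rest =>
      if PySem.Chars.isdigit c then pvA_num rest (10 * num + (c.toNat - 48))
      else (num, c :: rest)

theorem pvA_num_len (cs : List Char) (num : Nat) : (pvA_num cs num).2.length ≤ cs.length := by
  induction cs generalizing num with
  | nil => simp [pvA_num]
  | cons c rest ih =>
      simp only [pvA_num]
      split
      · exact le_trans (ih _) (Nat.le_succ _)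
      · simp

-- outer while loop of A (the first iteration of the inner while, whose guard is known
-- to hold, is unrolled so the remaining suffix strictly shrinks).
def pvA_loop (word : List Char) (wordIndex : Nat) (cs : List Char) : Bool :=
  match cs with
  | [] => wordIndex == word.length   -- `abbr_index == len(abbr)` is true here by construction
  | c :: rest =>
      if PySem.Chars.isdigit c then
        if c == '0' then false
        else
          let p := pvA_num rest (c.toNat - 48)
          pvA_loop word (wordIndex + p.1) p.2
      else
        if word.length ≤ wordIndex ∨ word[wordIndex]? ≠ some c then false
        else pvA_loop word (wordIndex + 1) rest
termination_by cs.length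
decreasing_by
  · exact Nat.lt_succ_of_le (pvA_num_len rest _)
  · simp

def isValidAbbreviation (word : String) (abbr : String) : Bool :=
  pvA_loop word.toList 0 abbr.toList

-- ===== PORT B =====
-- Phase 1: tokenize abbr into maximal runs of numeric / non-numeric characters
-- (the inner `while j < n and abbr[j].isnumeric() == k` is List.takeWhile/dropWhile).
def pvB_tok (cs : List Char) : List (List Char) :=
  match cs with
  | [] => []
  | c :: rest =>
      (c :: rest.takeWhile (fun d => PySem.Chars.isdigit d == PySem.Chars.isdigit c))
        :: pvB_tok (rest.dropWhile (fun d => PySem.Chars.isdigit d == PySem.Chars.isdigit c))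
termination_by cs.length
decreasing_by exact Nat.lt_succ_of_le (List.length_dropWhile_le _ _)

-- `num = 10*num + int(c)` over a numeric token
def pvB_num (t : List Char) : Nat := t.foldl (fun n c => 10 * n + (c.toNat - 48)) 0

-- the non-numeric-token inner for loop; none = early `return False`
def pvB_cmp (word : List Char) (wi : Nat) (t : List Char) : Option Nat :=
  match t with
  | [] => some wi
  | c :: rest =>
      if word.length ≤ wi ∨ word[wi]? ≠ some c then none
      else pvB_cmp word (wi + 1) rest

-- Phase 2: the `for t in tokens` loop
def pvB_run (word : List Char) (wi : Nat) (toks : List (List Char)) : Bool :=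
  match toks with
  | [] => wi == word.length
  | t :: ts =>
      match t with
      | [] => pvB_run word wi ts   -- unreachable: pvB_tok produces nonempty tokens
      | c :: _ =>
          if PySem.Chars.isdigit c then
            if c == '0' then false
            else pvB_run word (wi + pvB_num t) ts
          else
            match pvB_cmp word wi t with
            | none => false
            | some wi' => pvB_run word wi' ts

def isValidAbbreviation_alt (word : String) (abbr : String) : Bool :=
  pvB_run word.toList 0 (pvB_tok abbr.toList)

-- ===== PRECONDITION & SPEC =====
def Spec_isValidAbbreviation (word : String) (abbr : String) (out : Bool) : Prop := out = isValidAbbreviation_alt word abbr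
instance (word : String) (abbr : String) (out : Bool) : Decidable (Spec_isValidAbbreviation word abbr out) := by unfold Spec_isValidAbbreviation; infer_instance

-- ===== CLAIM (what is proved, stated in full; the proofs are below) =====
def Claim_equal_isValidAbbreviation : Prop := ∀ (word : String) (abbr : String), Dom_isValidAbbreviation word abbr → Spec_isValidAbbreviation word abbr (isValidAbbreviation word abbr)

-- ===== LEMMAS AND PROOFS =====

-- A's inner digit while loop computes the foldl over the maximal digit prefix and stops at its end.
theorem pvA_num_eq (cs : List Char) (num : Nat) :
    pvA_num cs num =
      ((cs.takeWhile (fun d => PySem.Chars.isdigit d)).foldl (fun n c => 10 * n + (c.toNat - 48)) num,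
        cs.dropWhile (fun d => PySem.Chars.isdigit d)) := by
  induction cs generalizing num with
  | nil => simp [pvA_num]
  | cons c rest ih =>
      by_cases hc : PySem.Chars.isdigit c
      · simp [pvA_num, hc, ih]
      · simp [pvA_num, hc]

-- A's letter steps across a run of non-digit chars match pvB_cmp on that run.
theorem pvA_letters (word : List Char) (run rest : List Char) (wi : Nat)
    (h : ∀ d ∈ run, PySem.Chars.isdigit d = false) :
    pvA_loop word wi (run ++ rest) =
      match pvB_cmp word wi run with
      | none => false
      | some wi' => pvA_loop word wi' rest := by
  induction run generalizing wi with
  | nil => simp [pvB_cmp]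
  | cons c run ih =>
      have hc : PySem.Chars.isdigit c = false := h c (by simp)
      rw [List.cons_append, pvA_loop, pvB_cmp]
      simp only [hc, Bool.false_eq_true, if_false]
      split
      · rfl
      · exact ih _ (fun d hd => h d (by simp [hd]))

-- Main bridging lemma: A's interleaved scan equals B's tokenize-then-consume.
theorem pvAB (word : List Char) (wi : Nat) (cs : List Char) :
    pvA_loop word wi cs = pvB_run word wi (pvB_tok cs) := by
  match cs with
  | [] => simp [pvA_loop, pvB_tok, pvB_run]
  | c :: rest =>
      rw [pvB_tok]
      by_cases hc : PySem.Chars.isdigit c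
      · by_cases h0 : c = '0'
        · rw [pvA_loop, pvB_run]; simp only [hc, if_true]; simp [h0]
        · rw [pvA_loop, pvB_run]
          simp only [hc, if_true, h0, beq_iff_eq, if_false]
          rw [pvA_num_eq]
          simp only [hc, beq_true]
          have harith : pvB_num (c :: rest.takeWhile (fun d => PySem.Chars.isdigit d)) =
              (rest.takeWhile (fun d => PySem.Chars.isdigit d)).foldl
                (fun n c => 10 * n + (c.toNat - 48)) (c.toNat - 48) := by
            simp [pvB_num]
          rw [harith]
          exact pvAB word _ (rest.dropWhile (fun d => PySem.Chars.isdigit d))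
      · rw [pvA_loop, pvB_run]
        simp only [hc, Bool.false_eq_true, if_false, beq_false]
        have hsplit : rest = rest.takeWhile (fun d => !PySem.Chars.isdigit d)
            ++ rest.dropWhile (fun d => !PySem.Chars.isdigit d) :=
          (List.takeWhile_append_dropWhile).symm
        split
        · rename_i hfail
          rw [show pvB_cmp word wi (c :: rest.takeWhile (fun d => !PySem.Chars.isdigit d)) = none by
            rw [pvB_cmp]; simp [hfail]]
        · rename_i hok
          rw [show pvB_cmp word wi (c :: rest.takeWhile (fun d => !PySem.Chars.isdigit d)) =
              pvB_cmp word (wi + 1) (rest.takeWhile (fun d => !PySem.Chars.isdigit d)) by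
            rw [pvB_cmp]; simp only [if_neg hok]]
          rw [show pvA_loop word (wi + 1) rest
              = pvA_loop word (wi + 1) (rest.takeWhile (fun d => !PySem.Chars.isdigit d)
                ++ rest.dropWhile (fun d => !PySem.Chars.isdigit d)) by rw [← hsplit]]
          rw [pvA_letters word _ _ _ (by
            intro d hd
            have := List.mem_takeWhile_imp hd
            simpa using this)]
          cases hcmp : pvB_cmp word (wi + 1) (rest.takeWhile (fun d => !PySem.Chars.isdigit d)) with
          | none => rfl
          | some wi' =>
              exact pvAB word wi' (rest.dropWhile (fun d => !PySem.Chars.isdigit d))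
termination_by cs.length
decreasing_by
  all_goals exact Nat.lt_succ_of_le (List.length_dropWhile_le _ _)

-- ===== VERDICT (by name: the statement is the Claim_ definition above) =====
theorem isValidAbbreviation_spec : Claim_equal_isValidAbbreviation := by
  intro word abbr _
  show isValidAbbreviation word abbr = isValidAbbreviation_alt word abbr
  exact pvAB word.toList 0 abbr.toList
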